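-- pv_equiv track=rewrite | github.com/maltonn/Atcoder-archive | agc048/a.py | solve
-- ===== SOURCE A (Python) =====
-- def Comp(a,b):#a>b か
--     return tuple(a)>tuple(b)
--
-- def solve(L):
--     M=[ord(x)-97 for x in 'atcoder']
--     if Comp(L,M):
--         return 0
--
--     if not any(L):#全部a
--         return -1
--
--     mn=101
--     for i in range(len(M)):
--         for j in range(i,len(L)):
--             if M[i]<L[j]:
--                 mn=min(mn,j-i)
--             if M[i]==L[j]:
--                 pass
--
--     return mn
-- ===== SOURCE B (Python) =====
-- def solve(L):
--     M = [ord(x) - 97 for x in 'atcoder']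
--     if tuple(L) > tuple(M):
--         return 0
--     if not any(L):
--         return -1
--     n = len(L)
--     # search over the gap d directly: the first feasible gap is the minimum
--     for d in range(min(n, 101)):
--         if any(M[i] < L[i + d] for i in range(min(7, n - d))):
--             return d
--     return 101
-- ===== Notes on version B (the rewrite author's own statement) =====
-- stated objective: alternative
-- what changed: Instead of scanning all (i,j) pairs while tracking a running minimum, B searches over the gap d = j - i in increasing order and returns the first feasible gap (capped by the 101 sentinel), so the minimum is found by early exit rather than by exhaustive minimisation.
import Mathlib
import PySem

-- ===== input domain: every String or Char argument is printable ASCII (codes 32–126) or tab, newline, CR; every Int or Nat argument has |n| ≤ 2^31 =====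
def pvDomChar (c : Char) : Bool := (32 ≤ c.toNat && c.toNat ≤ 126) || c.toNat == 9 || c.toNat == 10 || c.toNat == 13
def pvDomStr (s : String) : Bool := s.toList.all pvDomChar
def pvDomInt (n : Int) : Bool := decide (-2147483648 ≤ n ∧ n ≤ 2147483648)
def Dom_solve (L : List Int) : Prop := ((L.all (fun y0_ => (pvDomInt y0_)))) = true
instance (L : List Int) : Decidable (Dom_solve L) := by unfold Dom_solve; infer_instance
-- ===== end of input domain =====

-- B replaces A's exhaustive (i,j) double scan with a running minimum by a search over the
-- gap d = j - i in increasing order that returns the first feasible gap (alternative decomposition).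

-- ===== PORT A =====
-- Python tuple comparison tuple(a) > tuple(b): lexicographic, longer wins on equal prefix
def pyTupleGt : List Int → List Int → Bool
  | [], _ => false
  | _ :: _, [] => true
  | a :: as, b :: bs => if a > b then true else if a < b then false else pyTupleGt as bs

-- M = [ord(x)-97 for x in 'atcoder']
def atcoderM : List Int := "atcoder".toList.map (fun c => (c.toNat : Int) - 97)

def solve (L : List Int) : Int :=
  if pyTupleGt L atcoderM then 0
  else if !(L.any (fun x => x != 0)) then -1
  else
    (PySem.List.pyRange 0 (atcoderM.length : Int) 1).foldl (fun mn i =>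
      (PySem.List.pyRange i (L.length : Int) 1).foldl (fun mn j =>
        if PySem.List.pyGetD atcoderM i 0 < PySem.List.pyGetD L j 0 then min mn (j - i) else mn)
        mn) 101

-- ===== PORT B =====
-- any(M[i] < L[i+d] for i in range(min(7, n-d)))
def bFeas (L : List Int) (d : Int) : Bool :=
  (PySem.List.pyRange 0 (min 7 ((L.length : Int) - d)) 1).any (fun i =>
    PySem.List.pyGetD atcoderM i 0 < PySem.List.pyGetD L (i + d) 0)

-- for d in ds: if feasible(d): return d;  fallthrough: 101
def bSearch (L : List Int) : List Int → Int
  | [] => 101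
  | d :: ds => if bFeas L d then d else bSearch L ds

def solve_alt (L : List Int) : Int :=
  if pyTupleGt L atcoderM then 0
  else if !(L.any (fun x => x != 0)) then -1
  else bSearch L (PySem.List.pyRange 0 (min (L.length : Int) 101) 1)

-- ===== PRECONDITION & SPEC =====
def Spec_solve (L : List Int) (out : Int) : Prop := out = solve_alt L
instance (L : List Int) (out : Int) : Decidable (Spec_solve L out) := by unfold Spec_solve; infer_instance

-- ===== CLAIM (what is proved, stated in full; the proofs are below) =====
def Claim_equal_solve : Prop := ∀ (L : List Int), Dom_solve L → Spec_solve L (solve L)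

-- ===== LEMMAS AND PROOFS =====

-- "some i works for gap d": the condition both loops test, with j = i + d
def feasP (L : List Int) (d : Int) : Prop :=
  ∃ i : Int, 0 ≤ i ∧ i < 7 ∧ i + d < (L.length : Int) ∧
    PySem.List.pyGetD atcoderM i 0 < PySem.List.pyGetD L (i + d) 0

lemma bFeas_iff (L : List Int) (d : Int) : bFeas L d = true ↔ feasP L d := by
  simp only [bFeas, feasP, List.any_eq_true, PySem.List.mem_pyRange_one, decide_eq_true_eq]
  constructor
  · rintro ⟨i, ⟨h0, hlt⟩, hc⟩
    exact ⟨i, h0, by omega, by omega, hc⟩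
  · rintro ⟨i, h0, h7, hn, hc⟩
    exact ⟨i, ⟨h0, by omega⟩, hc⟩

-- characterisation of A's inner loop: fold of conditional min
lemma foldl_min_if_char {c : Int → Prop} [DecidablePred c] (f : Int → Int)
    (xs : List Int) (a : Int) :
    xs.foldl (fun mn j => if c j then min mn (f j) else mn) a ≤ a ∧
    (∀ j ∈ xs, c j → xs.foldl (fun mn j => if c j then min mn (f j) else mn) a ≤ f j) ∧
    (xs.foldl (fun mn j => if c j then min mn (f j) else mn) a = a ∨
      ∃ j ∈ xs, c j ∧ xs.foldl (fun mn j => if c j then min mn (f j) else mn) a = f j) := by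
  induction xs generalizing a with
  | nil => simp
  | cons x xs ih =>
    simp only [List.foldl_cons]
    by_cases hx : c x
    · simp only [if_pos hx]
      obtain ⟨ih1, ih2, ih3⟩ := ih (min a (f x))
      refine ⟨le_trans ih1 (by omega), ?_, ?_⟩
      · intro j hj hc
        rcases List.mem_cons.mp hj with h | h
        · subst h; exact le_trans ih1 (by omega)
        · exact ih2 j h hc
      · rcases ih3 with h | ⟨j, hj, hc, he⟩
        · rcases le_total a (f x) with hle | hle
          · left; rw [h]; omega
          · right; exact ⟨x, List.mem_cons_self, hx, by rw [h]; omega⟩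
        · right; exact ⟨j, List.mem_cons_of_mem _ hj, hc, he⟩
    · simp only [if_neg hx]
      obtain ⟨ih1, ih2, ih3⟩ := ih a
      refine ⟨ih1, ?_, ?_⟩
      · intro j hj hc
        rcases List.mem_cons.mp hj with h | h
        · subst h; exact absurd hc hx
        · exact ih2 j h hc
      · rcases ih3 with h | ⟨j, hj, hc, he⟩
        · left; exact h
        · right; exact ⟨j, List.mem_cons_of_mem _ hj, hc, he⟩

-- characterisation of A's nested loop
lemma foldl2_min_char {c : Int → Int → Prop} [∀ i, DecidablePred (c i)] (f : Int → Int → Int)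
    (js : Int → List Int) (is : List Int) (a : Int) :
    is.foldl (fun mn i => (js i).foldl (fun mn j => if c i j then min mn (f i j) else mn) mn) a ≤ a ∧
    (∀ i ∈ is, ∀ j ∈ js i, c i j →
      is.foldl (fun mn i => (js i).foldl (fun mn j => if c i j then min mn (f i j) else mn) mn) a ≤ f i j) ∧
    (is.foldl (fun mn i => (js i).foldl (fun mn j => if c i j then min mn (f i j) else mn) mn) a = a ∨
      ∃ i ∈ is, ∃ j ∈ js i, c i j ∧
        is.foldl (fun mn i => (js i).foldl (fun mn j => if c i j then min mn (f i j) else mn) mn) a = f i j) := by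
  induction is generalizing a with
  | nil => simp
  | cons x xs ih =>
    simp only [List.foldl_cons]
    obtain ⟨in1, in2, in3⟩ := foldl_min_if_char (c := c x) (f x) (js x) a
    obtain ⟨ih1, ih2, ih3⟩ := ih ((js x).foldl (fun mn j => if c x j then min mn (f x j) else mn) a)
    refine ⟨le_trans ih1 in1, ?_, ?_⟩
    · intro i hi j hj hc
      rcases List.mem_cons.mp hi with h | h
      · subst h; exact le_trans ih1 (in2 j hj hc)
      · exact ih2 i h j hj hc
    · rcases ih3 with h | ⟨i, hi, j, hj, hc, he⟩
      · rcases in3 with h2 | ⟨j, hj, hc, he⟩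
        · left; omega
        · right; exact ⟨x, by simp, j, hj, hc, by omega⟩
      · right; exact ⟨i, List.mem_cons_of_mem _ hi, j, hj, hc, he⟩

-- characterisation of B's search loop: no feasible gap in the list
lemma bSearch_none (L : List Int) (ds : List Int) (h : ∀ d ∈ ds, bFeas L d = false) :
    bSearch L ds = 101 := by
  induction ds with
  | nil => rfl
  | cons d ds ih =>
    simp only [bSearch, h d (by simp)]
    exact ih (fun d' hd' => h d' (List.mem_cons_of_mem _ hd'))

-- characterisation of B's search loop: some feasible gap in the (sorted) list
lemma bSearch_found (L : List Int) (ds : List Int) (hsort : ds.Pairwise (· ≤ ·))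
    (h : ∃ d ∈ ds, bFeas L d = true) :
    bFeas L (bSearch L ds) = true ∧ bSearch L ds ∈ ds ∧
      ∀ d ∈ ds, bFeas L d = true → bSearch L ds ≤ d := by
  induction ds with
  | nil => simp at h
  | cons d ds ih =>
    by_cases hd : bFeas L d = true
    · refine ⟨by simp [bSearch, hd], by simp [bSearch, hd], ?_⟩
      intro d' hd' _
      rcases List.mem_cons.mp hd' with h' | h'
      · simp [bSearch, hd, h']
      · simpa [bSearch, hd] using (List.pairwise_cons.mp hsort).1 d' h'
    · have h' : ∃ d' ∈ ds, bFeas L d' = true := by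
        rcases h with ⟨d', hd', hf⟩
        rcases List.mem_cons.mp hd' with h | h
        · exact absurd (h ▸ hf) hd
        · exact ⟨d', h, hf⟩
      obtain ⟨r1, r2, r3⟩ := ih (List.pairwise_cons.mp hsort).2 h'
      refine ⟨by simpa [bSearch, hd] using r1, by simp [bSearch, hd]; right; exact r2, ?_⟩
      intro d' hd' hf
      rcases List.mem_cons.mp hd' with h | h
      · exact absurd (h ▸ hf) hd
      · simpa [bSearch, hd] using r3 d' h hf

-- the else-branches of the two ports agree
lemma inner_eq (L : List Int) :
    (PySem.List.pyRange 0 (atcoderM.length : Int) 1).foldl (fun mn i =>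
      (PySem.List.pyRange i (L.length : Int) 1).foldl (fun mn j =>
        if PySem.List.pyGetD atcoderM i 0 < PySem.List.pyGetD L j 0 then min mn (j - i) else mn)
        mn) 101 =
    bSearch L (PySem.List.pyRange 0 (min (L.length : Int) 101) 1) := by
  have hM : (atcoderM.length : Int) = 7 := by decide
  rw [hM]
  set n : Int := (L.length : Int) with hn
  obtain ⟨a1, a2, a3⟩ := foldl2_min_char
    (c := fun i j => PySem.List.pyGetD atcoderM i 0 < PySem.List.pyGetD L j 0)
    (fun i j => j - i) (fun i => PySem.List.pyRange i n 1) (PySem.List.pyRange 0 7 1) 101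
  set rA := (PySem.List.pyRange 0 7 1).foldl (fun mn i =>
      (PySem.List.pyRange i n 1).foldl (fun mn j =>
        if PySem.List.pyGetD atcoderM i 0 < PySem.List.pyGetD L j 0 then min mn (j - i) else mn)
        mn) 101 with hrA
  -- rA is ≤ every feasible gap d ≥ 0
  have hAle : ∀ d : Int, 0 ≤ d → feasP L d → rA ≤ d := by
    intro d hd ⟨i, h0, h7, hlt, hc⟩
    have := a2 i (by rw [PySem.List.mem_pyRange_one]; omega) (i + d)
      (by rw [PySem.List.mem_pyRange_one]; omega) hc
    omega
  -- rA is either the sentinel or itself a feasible nonnegative gap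
  have hAfe : rA = 101 ∨ (0 ≤ rA ∧ rA < n ∧ feasP L rA) := by
    rcases a3 with h | ⟨i, hi, j, hj, hc, he⟩
    · left; exact h
    · right
      rw [PySem.List.mem_pyRange_one] at hi hj
      refine ⟨by omega, by omega, i, by omega, by omega, by omega, by rwa [show i + rA = j by omega]⟩
  by_cases hfound : ∃ d ∈ PySem.List.pyRange 0 (min n 101) 1, bFeas L d = true
  · obtain ⟨b1, b2, b3⟩ := bSearch_found L _
      ((PySem.List.pairwise_lt_pyRange_one 0 (min n 101)).imp le_of_lt) hfound
    set rB := bSearch L (PySem.List.pyRange 0 (min n 101) 1) with hrB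
    rw [PySem.List.mem_pyRange_one] at b2
    have hABle : rA ≤ rB := hAle rB (by omega) ((bFeas_iff L rB).mp b1)
    rcases hAfe with h | ⟨h0, hln, hf⟩
    · omega
    · have : bFeas L rA = true := (bFeas_iff L rA).mpr hf
      have := b3 rA (by rw [PySem.List.mem_pyRange_one]; omega) this
      omega
  · push Not at hfound
    rw [bSearch_none L _ (fun d hd => Bool.eq_false_iff.mpr (hfound d hd))]
    rcases hAfe with h | ⟨h0, hln, hf⟩
    · exact h
    · have hle : rA ≤ 101 := a1
      rcases eq_or_lt_of_le hle with h | h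
      · exact h
      · exact absurd ((bFeas_iff L rA).mpr hf)
          (by simpa using hfound rA (by rw [PySem.List.mem_pyRange_one]; omega))

-- ===== VERDICT (by name: the statement is the Claim_ definition above) =====
theorem solve_spec : Claim_equal_solve := by
  intro L _
  show solve L = solve_alt L
  unfold solve solve_alt
  split
  · rfl
  · split
    · rfl
    · exact inner_eq L
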